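-- pv_equiv track=rewrite | github.com/aorursy/KT_dataset_py | balaka18_apriori-for-arm-association-rule-mining.py | stage_4
-- ===== SOURCE A (Python) =====
-- from itertools import combinations
--
-- def check_freq(curr,prev,n):
--
--     if n > 1:
--
--         subsets = list(combinations(curr,n))
--
--     else:
--
--         subsets = curr
--
--     for item in subsets:
--
--         if not item in prev:
--
--             return False
--
--         else:
--
--             return True
--
-- def sublist(i1,i2):
--
--     return set(i1) <= set(i2)
--
-- def stage_4(l3,records,min_sup):
--
--     l3 = list(l3.keys())
--
--     L3 = sorted(list(set([item for temp in l3 for item in temp])))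
--
--     L3 = list(combinations(L3,4))
--
--     c4,l4 = {},{}
--
--     for it1 in L3:
--
--         count = 0
--
--         for it2 in records:
--
--             if sublist(it1,it2):
--
--                 count += 1
--
--         c4[it1] = count
--
--         for key,val in c4.items():
--
--             if val >= min_sup:
--
--                 if check_freq(key,l3,3):
--
--                     l4[key] = val
--
--     return c4,l4
-- ===== SOURCE B (Python) =====
-- from itertools import combinations
--
-- def stage_4(l3, records, min_sup):
--     keys = list(l3.keys())
--     items = sorted({x for k in keys for x in k})
--     c4 = {}
--     for cand in combinations(items, 4):
--         c4[cand] = sum(1 for r in records if set(cand) <= set(r))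
--     l4 = {k: v for k, v in c4.items() if v >= min_sup and k[:3] in keys}
--     return c4, l4
-- ===== Notes on version B (the rewrite author's own statement) =====
-- stated objective: simpler
-- what changed: B builds the c4 counts in one pass and then derives l4 by a single filter over the finished c4 (testing the lexicographically-first 3-subset as k[:3]), instead of A's rebuilding of l4 from all of c4 inside every candidate iteration.
import Mathlib
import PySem

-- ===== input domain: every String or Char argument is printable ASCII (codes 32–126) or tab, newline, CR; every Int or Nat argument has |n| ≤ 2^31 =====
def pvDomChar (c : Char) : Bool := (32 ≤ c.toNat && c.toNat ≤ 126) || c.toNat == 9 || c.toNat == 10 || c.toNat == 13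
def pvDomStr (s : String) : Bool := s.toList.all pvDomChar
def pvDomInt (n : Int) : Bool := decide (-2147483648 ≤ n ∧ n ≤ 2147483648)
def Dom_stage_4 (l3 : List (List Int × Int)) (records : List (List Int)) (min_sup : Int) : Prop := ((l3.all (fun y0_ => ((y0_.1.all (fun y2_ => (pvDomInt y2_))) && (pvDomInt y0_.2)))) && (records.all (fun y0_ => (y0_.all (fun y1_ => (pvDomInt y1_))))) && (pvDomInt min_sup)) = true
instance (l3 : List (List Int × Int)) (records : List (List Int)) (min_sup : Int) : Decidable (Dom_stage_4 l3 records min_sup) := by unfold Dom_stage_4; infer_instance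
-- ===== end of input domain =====

-- B builds c4 in one pass and derives l4 by a single filter over the finished c4, instead of A's
-- rebuild of l4 from all of c4 inside every candidate iteration (objective: simpler).


-- ===== PORT A =====
-- itertools.combinations(xs, n) in lexicographic (index) order; used by both Pythons
def pyCombs {α : Type} : Nat → List α → List (List α)
  | 0, _ => [[]]
  | _ + 1, [] => []
  | n + 1, x :: xs => ((pyCombs n xs).map (x :: ·)) ++ pyCombs (n + 1) xs
termination_by n xs => xs.length

-- check_freq(curr, prev, n): examines only the FIRST subset; returns None (falsy -> false) when there are none
def checkFreq (curr : List Int) (prev : List (List Int)) (n : Int) : Bool :=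
  if 1 < n then
    match pyCombs n.toNat curr with
    | [] => false
    | h :: _ => decide (h ∈ prev)
  else
    match curr with
    | [] => false
    | _ :: _ => false

-- sublist(i1, i2) = set(i1) <= set(i2)
def sublistA (i1 i2 : List Int) : Bool := i1.all (fun x => decide (x ∈ i2))

def stage_4 (l3 : List (List Int × Int)) (records : List (List Int)) (min_sup : Int) : (List (List Int × Int)) × (List (List Int × Int)) :=
  let keys := l3.map (·.1)
  let l3s : List Int := PySem.List.sorted (PySem.Set.ofList keys.flatten) (fun x => x)
  let l3c := pyCombs 4 l3s
  let res := l3c.foldl (fun (st : PySem.Dict (List Int) Int × PySem.Dict (List Int) Int) it1 =>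
      let count := records.foldl (fun cnt it2 => if sublistA it1 it2 then cnt + 1 else cnt) (0 : Int)
      let c4 := st.1.insert it1 count
      let l4 := c4.items.foldl (fun l4 kv =>
          if min_sup ≤ kv.2 then (if checkFreq kv.1 keys 3 then l4.insert kv.1 kv.2 else l4) else l4) st.2
      (c4, l4)) (PySem.Dict.empty, PySem.Dict.empty)
  (res.1.items, res.2.items)

-- ===== PORT B =====
def stage_4_alt (l3 : List (List Int × Int)) (records : List (List Int)) (min_sup : Int) : (List (List Int × Int)) × (List (List Int × Int)) :=
  let keys := l3.map (·.1)
  let its : List Int := PySem.List.sorted (PySem.Set.ofList keys.flatten) (fun x => x)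
  let c4 := (pyCombs 4 its).foldl (fun d cand =>
      d.insert cand ((records.countP (fun r => cand.all (fun x => decide (x ∈ r)))) : Int)) PySem.Dict.empty
  let l4 := c4.items.filter (fun kv => min_sup ≤ kv.2 && decide (kv.1.take 3 ∈ keys))
  (c4.items, l4)

-- ===== PRECONDITION & SPEC =====
def Spec_stage_4 (l3 : List (List Int × Int)) (records : List (List Int)) (min_sup : Int) (out : (List (List Int × Int)) × (List (List Int × Int))) : Prop := out = stage_4_alt l3 records min_sup
instance (l3 : List (List Int × Int)) (records : List (List Int)) (min_sup : Int) (out : (List (List Int × Int)) × (List (List Int × Int))) : Decidable (Spec_stage_4 l3 records min_sup out) := by unfold Spec_stage_4; infer_instance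

-- ===== CLAIM (what is proved, stated in full; the proofs are below) =====
def Claim_equal_stage_4 : Prop := ∀ (l3 : List (List Int × Int)) (records : List (List Int)) (min_sup : Int), Dom_stage_4 l3 records min_sup → Spec_stage_4 l3 records min_sup (stage_4 l3 records min_sup)

-- ===== LEMMAS AND PROOFS =====

theorem mem_pyCombs_sublist {α : Type} : ∀ (xs : List α) (n : Nat) (l : List α),
    l ∈ pyCombs n xs → l.Sublist xs := by
  intro xs
  induction xs with
  | nil => intro n l h; cases n <;> simp [pyCombs] at h <;> simp [h]
  | cons x t ih =>
    intro n l h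
    cases n with
    | zero => simp [pyCombs] at h; simp [h]
    | succ n =>
      simp [pyCombs] at h
      rcases h with ⟨l', hl', rfl⟩ | h
      · exact (ih n l' hl').cons₂ x
      · exact (ih (n+1) l h).cons x

theorem length_of_mem_pyCombs {α : Type} : ∀ (xs : List α) (n : Nat) (l : List α),
    l ∈ pyCombs n xs → l.length = n := by
  intro xs
  induction xs with
  | nil => intro n l h; cases n <;> simp [pyCombs] at h; simp [h]
  | cons x t ih =>
    intro n l h
    cases n with
    | zero => simp [pyCombs] at h; simp [h]
    | succ n =>
      simp [pyCombs] at h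
      rcases h with ⟨l', hl', rfl⟩ | h
      · simp [ih n l' hl']
      · exact ih (n+1) l h

theorem nodup_pyCombs {α : Type} : ∀ (xs : List α) (n : Nat), xs.Nodup → (pyCombs n xs).Nodup := by
  intro xs
  induction xs with
  | nil => intro n h; cases n <;> simp [pyCombs]
  | cons x t ih =>
    intro n h
    rcases List.nodup_cons.mp h with ⟨hx, ht⟩
    cases n with
    | zero => simp [pyCombs]
    | succ n =>
      simp only [pyCombs]
      refine List.Nodup.append ?_ (ih (n+1) ht) ?_
      · exact (ih n ht).map (fun a b hab => by simpa using hab)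
      · intro l hl1 hl2
        simp at hl1
        rcases hl1 with ⟨l', _, rfl⟩
        have := mem_pyCombs_sublist t (n+1) _ hl2
        exact hx (this.subset (by simp))

theorem pyCombs_head {α : Type} : ∀ (xs : List α) (n : Nat), n ≤ xs.length →
    ∃ rest, pyCombs n xs = xs.take n :: rest := by
  intro xs
  induction xs with
  | nil =>
    intro n h
    cases n with
    | zero => exact ⟨[], by simp [pyCombs]⟩
    | succ n => simp at h
  | cons x t ih =>
    intro n h
    cases n with
    | zero => exact ⟨[], by simp [pyCombs]⟩
    | succ n =>
      obtain ⟨r, hr⟩ := ih n (by simpa using h)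
      exact ⟨(r.map (x :: ·)) ++ pyCombs (n+1) t, by simp [pyCombs, hr]⟩

theorem checkFreq_eq_take (cand : List Int) (keys : List (List Int)) (h : cand.length = 4) :
    checkFreq cand keys 3 = decide (cand.take 3 ∈ keys) := by
  obtain ⟨r, hr⟩ := pyCombs_head cand 3 (by omega)
  simp [checkFreq, hr]

theorem keys_eq_map_fst {κ ν : Type} (d : PySem.Dict κ ν) : d.keys = d.items.map Prod.fst := by
  simp [PySem.Dict.keys]

theorem dict_ext {κ ν : Type} (d e : PySem.Dict κ ν) (h : d.items = e.items) : d = e := by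
  cases d; cases e; simpa [PySem.Dict.items] using h

theorem insert_mem_self {κ ν : Type} [BEq κ] [LawfulBEq κ] (d : PySem.Dict κ ν) (k : κ) (v : ν)
    (hmem : (k, v) ∈ d.items) (hnd : d.keys.Nodup) : d.insert k v = d := by
  have hc : d.contains k = true := by
    rw [PySem.Dict.contains_iff_mem_keys, keys_eq_map_fst]
    exact List.mem_map_of_mem hmem
  apply dict_ext
  rw [PySem.Dict.items_insert_of_contains d v hc]
  have : ∀ p ∈ d.items, (fun p : κ × ν => if (p.1 == k) = true then (k, v) else p) p = p := by
    rintro ⟨p1, p2⟩ hp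
    by_cases he : p1 = k
    · subst he
      have h1 := PySem.Dict.get?_of_mem_items d hp hnd
      have h2 := PySem.Dict.get?_of_mem_items d hmem hnd
      rw [h1] at h2
      simp at h2
      simp [h2]
    · simp [he]
  simpa using List.map_congr_left this

theorem countA_eq (records : List (List Int)) (it1 : List Int) :
    records.foldl (fun cnt it2 => if sublistA it1 it2 then cnt + 1 else cnt) (0 : Int)
      = ((records.countP (fun r => it1.all (fun x => decide (x ∈ r)))) : Int) := by
  simpa [sublistA] using PySem.List.foldl_count_if (fun it2 => sublistA it1 it2) records 0

theorem foldl_ins_id (min_sup : Int) (keys : List (List Int)) :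
    ∀ (L : List (List Int × Int)) (acc : PySem.Dict (List Int) Int),
    acc.keys.Nodup →
    (∀ kv ∈ L, min_sup ≤ kv.2 → checkFreq kv.1 keys 3 = true → kv ∈ acc.items) →
    L.foldl (fun l4 kv =>
        if min_sup ≤ kv.2 then (if checkFreq kv.1 keys 3 then l4.insert kv.1 kv.2 else l4) else l4) acc = acc := by
  intro L
  induction L with
  | nil => intro acc _ _; rfl
  | cons kv L ih =>
    intro acc hnd h
    have hstep : (if min_sup ≤ kv.2 then (if checkFreq kv.1 keys 3 then acc.insert kv.1 kv.2 else acc) else acc) = acc := by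
      by_cases h1 : min_sup ≤ kv.2
      · by_cases h2 : checkFreq kv.1 keys 3 = true
        · simp [h1, h2, insert_mem_self acc kv.1 kv.2 (h kv (by simp) h1 h2) hnd]
        · simp [h1, h2]
      · simp [h1]
    rw [List.foldl_cons, hstep]
    exact ih acc hnd (fun kv' h' => h kv' (by simp [h']))

theorem main_loop (keys records : List (List Int)) (min_sup : Int) :
    ∀ (cs : List (List Int)) (c4 l4 : PySem.Dict (List Int) Int),
    c4.keys.Nodup →
    (∀ kv ∈ c4.items, kv.1.length = 4) →
    l4.items = c4.items.filter (fun kv => min_sup ≤ kv.2 && decide (kv.1.take 3 ∈ keys)) →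
    cs.Nodup →
    (∀ c ∈ cs, c ∉ c4.keys ∧ c.length = 4) →
    (cs.foldl (fun (st : PySem.Dict (List Int) Int × PySem.Dict (List Int) Int) it1 =>
        let count := records.foldl (fun cnt it2 => if sublistA it1 it2 then cnt + 1 else cnt) (0 : Int)
        let c4 := st.1.insert it1 count
        let l4 := c4.items.foldl (fun l4 kv =>
            if min_sup ≤ kv.2 then (if checkFreq kv.1 keys 3 then l4.insert kv.1 kv.2 else l4) else l4) st.2
        (c4, l4)) (c4, l4)).1
      = cs.foldl (fun d cand =>
          d.insert cand ((records.countP (fun r => cand.all (fun x => decide (x ∈ r)))) : Int)) c4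
    ∧ (cs.foldl (fun (st : PySem.Dict (List Int) Int × PySem.Dict (List Int) Int) it1 =>
        let count := records.foldl (fun cnt it2 => if sublistA it1 it2 then cnt + 1 else cnt) (0 : Int)
        let c4 := st.1.insert it1 count
        let l4 := c4.items.foldl (fun l4 kv =>
            if min_sup ≤ kv.2 then (if checkFreq kv.1 keys 3 then l4.insert kv.1 kv.2 else l4) else l4) st.2
        (c4, l4)) (c4, l4)).2.items
      = (cs.foldl (fun d cand =>
          d.insert cand ((records.countP (fun r => cand.all (fun x => decide (x ∈ r)))) : Int)) c4).items.filter
          (fun kv => min_sup ≤ kv.2 && decide (kv.1.take 3 ∈ keys)) := by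
  intro cs
  induction cs with
  | nil => intro c4 l4 _ _ h2 _ _; exact ⟨rfl, h2⟩
  | cons c cs ih =>
    intro c4 l4 hnd h3 h2 h4 h5
    obtain ⟨hc, hlen⟩ := h5 c (by simp)
    have hncont : c4.contains c = false := by
      cases hb : c4.contains c with
      | false => rfl
      | true => exact absurd ((PySem.Dict.contains_iff_mem_keys c4 c).mp hb) hc
    have hitems' : (c4.insert c (records.foldl (fun cnt it2 => if sublistA c it2 then cnt + 1 else cnt) (0 : Int))).items
        = c4.items ++ [(c, records.foldl (fun cnt it2 => if sublistA c it2 then cnt + 1 else cnt) (0 : Int))] :=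
      PySem.Dict.items_insert_of_not_contains c4 _ hncont
    set v := records.foldl (fun cnt it2 => if sublistA c it2 then cnt + 1 else cnt) (0 : Int) with hv
    set c4' := c4.insert c v with hc4'
    have hkeys' : c4'.keys = c4.keys ++ [c] := PySem.Dict.keys_insert_of_not_contains c4 v hncont
    have hnd' : c4'.keys.Nodup := PySem.Dict.nodup_keys_insert c4 c v hnd
    have hl4nd : l4.keys.Nodup := by
      rw [keys_eq_map_fst, h2]
      exact (List.filter_sublist.map Prod.fst).nodup (by rw [keys_eq_map_fst] at hnd; exact hnd)
    -- the inner rebuild loop over the old items is the identity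
    have hinner : c4.items.foldl (fun l4 kv =>
        if min_sup ≤ kv.2 then (if checkFreq kv.1 keys 3 then l4.insert kv.1 kv.2 else l4) else l4) l4 = l4 := by
      apply foldl_ins_id min_sup keys c4.items l4 hl4nd
      intro kv hkv hle hcf
      rw [h2, List.mem_filter]
      refine ⟨hkv, ?_⟩
      rw [checkFreq_eq_take kv.1 keys (h3 kv hkv)] at hcf
      simp [hle, hcf]
    -- the new pair: appended iff it qualifies
    have hcl4 : c ∉ l4.keys := by
      intro hmem
      apply hc
      rw [keys_eq_map_fst, h2] at hmem
      rw [keys_eq_map_fst]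
      exact (List.filter_sublist.map Prod.fst).subset hmem
    have hl4'' : (if min_sup ≤ v then (if checkFreq c keys 3 then l4.insert c v else l4) else l4).items
        = c4'.items.filter (fun kv => min_sup ≤ kv.2 && decide (kv.1.take 3 ∈ keys)) := by
      rw [hitems', List.filter_append, ← h2]
      rw [checkFreq_eq_take c keys hlen]
      by_cases hq1 : min_sup ≤ v
      · by_cases hq2 : c.take 3 ∈ keys
        · have : l4.contains c = false := by
            cases hb : l4.contains c with
            | false => rfl
            | true => exact absurd ((PySem.Dict.contains_iff_mem_keys l4 c).mp hb) hcl4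
          simp [hq1, hq2, PySem.Dict.items_insert_of_not_contains l4 v this]
        · simp [hq1, hq2]
      · simp [hq1]
    -- apply the induction hypothesis after one step
    have happly := ih c4' (if min_sup ≤ v then (if checkFreq c keys 3 then l4.insert c v else l4) else l4)
      hnd'
      (by intro kv hkv
          rw [hitems'] at hkv
          rcases List.mem_append.mp hkv with h | h
          · exact h3 kv h
          · simp at h; rw [h]; exact hlen)
      hl4''
      (List.nodup_cons.mp h4).2
      (by intro c' hc'
          obtain ⟨hnotin, hlen'⟩ := h5 c' (by simp [hc'])
          refine ⟨?_, hlen'⟩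
          rw [hkeys']
          simp
          exact ⟨hnotin, fun hcc => ((List.nodup_cons.mp h4).1 (hcc ▸ hc')).elim⟩)
    rw [List.foldl_cons, List.foldl_cons]
    have hfold2 : (c4.insert c v).items.foldl (fun l4 kv =>
        if min_sup ≤ kv.2 then (if checkFreq kv.1 keys 3 then l4.insert kv.1 kv.2 else l4) else l4) l4
        = (if min_sup ≤ v then (if checkFreq c keys 3 then l4.insert c v else l4) else l4) := by
      rw [← hc4', hitems', List.foldl_append, hinner]
      simp [List.foldl_cons, List.foldl_nil]
    have hcnt : ((records.countP (fun r => c.all (fun x => decide (x ∈ r)))) : Int) = v := (countA_eq records c).symm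
    simp only [← hv, hcnt, hfold2]
    exact happly

theorem stage_4_spec' (l3 : List (List Int × Int)) (records : List (List Int)) (min_sup : Int) :
    stage_4 l3 records min_sup = stage_4_alt l3 records min_sup := by
  have hS : (PySem.List.sorted (PySem.Set.ofList ((l3.map (·.1)).flatten)) (fun x => x)).Nodup :=
    ((PySem.List.sorted_perm _ _ _).nodup_iff).mpr (PySem.Set.nodup_ofList _)
  obtain ⟨h1, h2⟩ := main_loop (l3.map (·.1)) records min_sup
    (pyCombs 4 (PySem.List.sorted (PySem.Set.ofList ((l3.map (·.1)).flatten)) (fun x => x)))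
    PySem.Dict.empty PySem.Dict.empty
    PySem.Dict.nodup_keys_empty
    (by intro kv hkv; simp [PySem.Dict.empty] at hkv)
    (by rfl)
    (nodup_pyCombs _ 4 hS)
    (by intro c hc
        exact ⟨by simp [PySem.Dict.keys_empty], length_of_mem_pyCombs _ 4 c hc⟩)
  unfold stage_4 stage_4_alt
  simp only [h1, h2]

-- ===== VERDICT (by name: the statement is the Claim_ definition above) =====
theorem stage_4_spec : Claim_equal_stage_4 := by
  intro l3 records min_sup _
  unfold Spec_stage_4
  exact stage_4_spec' l3 records min_sup
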